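-- pv_equiv track=rewrite | github.com/zimingttkx/AmericaMathModel | .factory/skills/batch_writer_tool.py | validate_integrity
-- ===== SOURCE A (Python) =====
-- def validate_integrity(original_content: str, written_content: str) -> bool:
--     """
--     Validate that written content matches original content.
--
--     Args:
--         original_content: The original content that was to be written
--         written_content: The content read back from file
--
--     Returns:
--         True if content matches, False otherwise
--     """
--     original_lines = original_content.split('\n')
--     written_lines = written_content.split('\n')
--
--     if len(original_lines) != len(written_lines):
--         return False
--
--     # Compare line by line
--     for orig, written in zip(original_lines, written_lines):
--         if orig != written:
--             return False
--
--     return True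
-- ===== SOURCE B (Python) =====
-- def validate_integrity(original_content: str, written_content: str) -> bool:
--     """Splitting on '\n' is lossless, so the line lists agree iff the strings do."""
--     return original_content == written_content
-- ===== Notes on version B (the rewrite author's own statement) =====
-- stated objective: simpler
-- what changed: B drops the split-into-lines, length guard and zip loop entirely and returns direct string equality, which is equivalent because splitting on '\n' is lossless.
import Mathlib
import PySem

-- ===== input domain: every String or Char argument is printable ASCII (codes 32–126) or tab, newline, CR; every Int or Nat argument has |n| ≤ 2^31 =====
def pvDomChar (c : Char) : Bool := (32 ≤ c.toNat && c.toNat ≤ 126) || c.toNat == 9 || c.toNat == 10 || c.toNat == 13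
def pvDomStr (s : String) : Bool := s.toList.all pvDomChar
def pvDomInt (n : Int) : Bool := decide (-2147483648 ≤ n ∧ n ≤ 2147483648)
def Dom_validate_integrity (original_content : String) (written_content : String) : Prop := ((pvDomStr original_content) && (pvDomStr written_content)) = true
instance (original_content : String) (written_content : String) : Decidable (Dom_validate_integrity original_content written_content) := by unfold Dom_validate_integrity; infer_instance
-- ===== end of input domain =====

-- B replaces A's split-into-lines + length guard + zip loop by a single direct string
-- equality, equivalent because splitting on '\n' and rejoining is lossless (objective: simpler).


-- ===== PORT A =====
-- the 'for orig, written in zip(...): if orig != written: return False' loop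
def cmpZipLines : List (List Char × List Char) → Bool
  | [] => true
  | (orig, written) :: rest => if orig ≠ written then false else cmpZipLines rest

def validate_integrity (original_content : String) (written_content : String) : Bool :=
  let original_lines := PySem.Chars.splitOn original_content.toList ['\n']
  let written_lines := PySem.Chars.splitOn written_content.toList ['\n']
  if original_lines.length ≠ written_lines.length then false
  else cmpZipLines (original_lines.zip written_lines)

-- ===== PORT B =====
def validate_integrity_alt (original_content : String) (written_content : String) : Bool :=
  original_content == written_content

-- ===== PRECONDITION & SPEC =====
def Spec_validate_integrity (original_content : String) (written_content : String) (out : Bool) : Prop := out = validate_integrity_alt original_content written_content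
instance (original_content : String) (written_content : String) (out : Bool) : Decidable (Spec_validate_integrity original_content written_content out) := by unfold Spec_validate_integrity; infer_instance

-- ===== CLAIM (what is proved, stated in full; the proofs are below) =====
def Claim_equal_validate_integrity : Prop := ∀ (original_content : String) (written_content : String), Dom_validate_integrity original_content written_content → Spec_validate_integrity original_content written_content (validate_integrity original_content written_content)

-- ===== LEMMAS AND PROOFS =====

-- the zip loop on equal-length lists decides list equality
theorem cmpZipLines_zip_eq (xs : List (List Char)) : ∀ ys : List (List Char),
    xs.length = ys.length → cmpZipLines (xs.zip ys) = decide (xs = ys) := by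
  induction xs with
  | nil => intro ys h; cases ys <;> simp_all [cmpZipLines]
  | cons x xt ih =>
    intro ys h
    cases ys with
    | nil => simp at h
    | cons y yt =>
      simp only [List.zip_cons_cons, cmpZipLines]
      by_cases hxy : x = y
      · subst hxy
        simp [ih yt (by simpa using h)]
      · simp [hxy]

theorem intercalate_cons_cons (sep a b : List Char) (l : List (List Char)) :
    List.intercalate sep (a :: b :: l) = a ++ sep ++ List.intercalate sep (b :: l) := by
  simp [List.intercalate, List.intersperse]

theorem intercalate_snoc_snoc (sep : List Char) : ∀ (ps : List (List Char)) (a b : List Char),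
    List.intercalate sep (ps ++ [a, b]) = List.intercalate sep (ps ++ [a ++ sep ++ b]) := by
  intro ps
  induction ps with
  | nil => intro a b; simp [List.intercalate, List.intersperse]
  | cons p pt ih =>
    intro a b
    cases pt with
    | nil =>
      simp only [List.nil_append, List.cons_append, intercalate_cons_cons]
      simp [List.intercalate, List.intersperse]
    | cons q qt =>
      have h1 := ih a b
      simp only [List.cons_append, intercalate_cons_cons] at *
      rw [h1]

-- joining the pieces of PySem's splitOn.go restores acc.reverse ++ [cur.reverse ++ l]
theorem go_join (fuel : Nat) : ∀ (l cur : List Char) (acc : List (List Char)),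
    l.length < fuel →
    List.intercalate ['\n'] (PySem.Chars.splitOn.go ['\n'] fuel l cur acc)
      = List.intercalate ['\n'] (acc.reverse ++ [cur.reverse ++ l]) := by
  induction fuel with
  | zero => intro l cur acc h; omega
  | succ n ih =>
    intro l cur acc h
    cases l with
    | nil => simp [PySem.Chars.splitOn.go]
    | cons c rest =>
      simp only [PySem.Chars.splitOn.go]
      by_cases hp : List.isPrefixOf ['\n'] (c :: rest) = true
      · simp only [hp, if_pos]
        have hc : c = '\n' := by
          simp [List.isPrefixOf] at hp; exact hp.symm
        have hlen : rest.length < n := by simp at h; omega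
        rw [ih _ _ _ (by simpa using hlen)]
        have := intercalate_snoc_snoc ['\n'] acc.reverse cur.reverse rest
        simp only [List.reverse_cons, List.reverse_nil, List.nil_append]
        calc List.intercalate ['\n'] ((acc.reverse ++ [cur.reverse]) ++ [[] ++ rest])
            = List.intercalate ['\n'] (acc.reverse ++ [cur.reverse, rest]) := by
              simp
          _ = List.intercalate ['\n'] (acc.reverse ++ [cur.reverse ++ ['\n'] ++ rest]) := this
          _ = List.intercalate ['\n'] (acc.reverse ++ [cur.reverse ++ c :: rest]) := by
              subst hc; simp
      · rw [if_neg (by simp [hp])]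
        have hlen : rest.length < n := by simp at h; omega
        rw [ih rest (c :: cur) acc hlen]
        simp

theorem join_splitOn (s : List Char) :
    List.intercalate ['\n'] (PySem.Chars.splitOn s ['\n']) = s := by
  unfold PySem.Chars.splitOn
  rw [go_join (s.length + 1) s [] [] (by omega)]
  simp [List.intercalate]

theorem splitOn_inj {a b : List Char}
    (h : PySem.Chars.splitOn a ['\n'] = PySem.Chars.splitOn b ['\n']) : a = b := by
  have := join_splitOn a
  rw [h, join_splitOn b] at this
  exact this.symm

-- ===== VERDICT (by name: the statement is the Claim_ definition above) =====
theorem validate_integrity_spec : Claim_equal_validate_integrity := by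
  intro o w _
  unfold Spec_validate_integrity validate_integrity validate_integrity_alt
  simp only []
  by_cases hlen : (PySem.Chars.splitOn o.toList ['\n']).length = (PySem.Chars.splitOn w.toList ['\n']).length
  · rw [if_neg (by simp [hlen]), cmpZipLines_zip_eq _ _ hlen]
    by_cases heq : PySem.Chars.splitOn o.toList ['\n'] = PySem.Chars.splitOn w.toList ['\n']
    · have : o = w := by
        have := splitOn_inj heq
        exact String.ext (by simpa [String.toList] using this)
      simp [this]
    · have how : o ≠ w := by
        intro hc; exact heq (by rw [hc])
      simp [heq, how]
  · rw [if_pos (by simpa using hlen)]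
    have how : o ≠ w := by
      intro hc; rw [hc] at hlen; exact hlen rfl
    simp [how]
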